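-- pv_equiv track=rewrite | github.com/AMDResearch/Riallto | npu/build/mlirsequencebuilder.py | _transfer_monotonically_increasing
-- ===== SOURCE A (Python) =====
-- from typing import Tuple, List
--
-- def _transfer_monotonically_increasing(offset_list:List[int])->bool:
--     if len(offset_list) > 1:
--         diff_amount = offset_list[1] - offset_list[0]
--         if diff_amount < 0:
--             return False
--         else:
--             for i in range(len(offset_list)-1):
--                 if offset_list[i+1] < offset_list[i]:
--                     return False
--     return True
-- ===== SOURCE B (Python) =====
-- def _transfer_monotonically_increasing(offset_list):
--     return offset_list == sorted(offset_list)
-- ===== Notes on version B (the rewrite author's own statement) =====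
-- stated objective: idiomatic
-- what changed: Replaces the index loop over adjacent pairs (with a redundant first-difference check) by comparing the list with its sorted copy.
import Mathlib
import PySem

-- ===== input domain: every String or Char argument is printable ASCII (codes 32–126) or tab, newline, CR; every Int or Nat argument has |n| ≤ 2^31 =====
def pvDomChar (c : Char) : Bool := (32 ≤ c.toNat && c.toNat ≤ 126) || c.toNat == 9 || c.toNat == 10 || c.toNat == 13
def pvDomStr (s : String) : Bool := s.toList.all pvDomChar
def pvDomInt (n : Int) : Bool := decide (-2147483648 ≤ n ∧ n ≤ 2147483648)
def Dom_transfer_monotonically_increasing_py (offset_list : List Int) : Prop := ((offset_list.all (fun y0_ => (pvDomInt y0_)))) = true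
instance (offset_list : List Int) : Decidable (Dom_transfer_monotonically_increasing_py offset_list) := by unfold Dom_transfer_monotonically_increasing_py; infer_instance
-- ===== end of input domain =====

-- B replaces A's adjacent-pair index loop by comparing the list with its sorted copy (idiomatic, same result).


-- ===== PORT A =====
-- the 'for i in range(len(offset_list)-1)' loop with its early 'return False'
def pyA_loop (l : List Int) (i : Nat) : Bool :=
  if _h : i + 1 < l.length then
    if l.getD (i+1) 0 < l.getD i 0 then false else pyA_loop l (i+1)
  else true
termination_by l.length - i

def transfer_monotonically_increasing_py (offset_list : List Int) : Bool :=
  if 1 < offset_list.length then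
    -- indices 0 and 1 are in range here, so getD is exact
    let diff_amount := offset_list.getD 1 0 - offset_list.getD 0 0
    if diff_amount < 0 then false else pyA_loop offset_list 0
  else true

-- ===== PORT B =====
def transfer_monotonically_increasing_py_alt (offset_list : List Int) : Bool :=
  decide (offset_list = PySem.List.sorted offset_list (fun x => x) false)

-- ===== PRECONDITION & SPEC =====
def Spec_transfer_monotonically_increasing_py (offset_list : List Int) (out : Bool) : Prop := out = transfer_monotonically_increasing_py_alt offset_list
instance (offset_list : List Int) (out : Bool) : Decidable (Spec_transfer_monotonically_increasing_py offset_list out) := by unfold Spec_transfer_monotonically_increasing_py; infer_instance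

-- ===== CLAIM (what is proved, stated in full; the proofs are below) =====
def Claim_equal_transfer_monotonically_increasing_py : Prop := ∀ (offset_list : List Int), Dom_transfer_monotonically_increasing_py offset_list → Spec_transfer_monotonically_increasing_py offset_list (transfer_monotonically_increasing_py offset_list)

-- ===== LEMMAS AND PROOFS =====

theorem pyA_loop_true_iff (l : List Int) : ∀ (n i : Nat), l.length ≤ i + n →
    (pyA_loop l i = true ↔ ∀ j, i ≤ j → (hj : j + 1 < l.length) → l[j] ≤ l[j+1]) := by
  intro n
  induction n with
  | zero =>
    intro i hn
    rw [pyA_loop]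
    simp only [dif_neg (by omega : ¬ i + 1 < l.length)]
    constructor
    · intro _ j hij hj; omega
    · intro _; trivial
  | succ n ih =>
    intro i hn
    rw [pyA_loop]
    by_cases h : i + 1 < l.length
    · simp only [dif_pos h]
      have e1 : l.getD (i+1) 0 = l[i+1] := List.getD_eq_getElem l 0 h
      have e0 : l.getD i 0 = l[i] := List.getD_eq_getElem l 0 (by omega)
      by_cases hc : l.getD (i+1) 0 < l.getD i 0
      · simp only [if_pos hc]
        constructor
        · intro hh; exact absurd hh (by simp)
        · intro hall
          have := hall i le_rfl h
          rw [e0, e1] at hc; omega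
      · simp only [if_neg hc]
        rw [ih (i+1) (by omega)]
        constructor
        · intro hall j hij hj
          rcases Nat.eq_or_lt_of_le hij with rfl | hlt
          · rw [e0, e1] at hc; omega
          · exact hall j hlt hj
        · intro hall j hij hj; exact hall j (by omega) hj
    · simp only [dif_neg h]
      constructor
      · intro _ j hij hj; omega
      · intro _; trivial

theorem loop_iff_pairwise (l : List Int) :
    pyA_loop l 0 = true ↔ l.Pairwise (· ≤ ·) := by
  rw [pyA_loop_true_iff l l.length 0 (by omega), ← List.isChain_iff_pairwise,
    List.isChain_iff_getElem]
  constructor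
  · intro h j hj; exact h j (Nat.zero_le _) (by omega)
  · intro h j _ hj; exact h j (by omega)

theorem alt_iff_pairwise (l : List Int) :
    transfer_monotonically_increasing_py_alt l = true ↔ l.Pairwise (· ≤ ·) := by
  unfold transfer_monotonically_increasing_py_alt
  simp only [decide_eq_true_eq]
  constructor
  · intro h
    have hp := PySem.List.sorted_pairwise (xs := l) (key := fun x => x)
    rw [← h] at hp
    exact hp
  · intro h
    exact (PySem.List.sorted_eq_self_of_pairwise (key := fun x : Int => x) (xs := l) h).symm

-- ===== VERDICT (by name: the statement is the Claim_ definition above) =====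
theorem transfer_monotonically_increasing_py_spec : Claim_equal_transfer_monotonically_increasing_py := by
  intro l _
  unfold Spec_transfer_monotonically_increasing_py
  unfold transfer_monotonically_increasing_py
  by_cases h1 : 1 < l.length
  · simp only [if_pos h1]
    by_cases hd : l.getD 1 0 - l.getD 0 0 < 0
    · simp only [if_pos hd]
      have e1 : l.getD 1 0 = l[1] := List.getD_eq_getElem l 0 h1
      have e0 : l.getD 0 0 = l[0] := List.getD_eq_getElem l 0 (by omega)
      symm
      rw [Bool.eq_false_iff]
      intro hb
      have hp := (alt_iff_pairwise l).mp hb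
      rw [← List.isChain_iff_pairwise, List.isChain_iff_getElem] at hp
      have := hp 0 (by omega)
      rw [e0, e1] at hd
      simp only [Nat.zero_add] at this
      omega
    · simp only [if_neg hd]
      rcases hb : transfer_monotonically_increasing_py_alt l with _ | _
      · rw [Bool.eq_false_iff]
        intro hl
        have := (loop_iff_pairwise l).mp hl
        rw [Bool.eq_false_iff] at hb
        exact hb ((alt_iff_pairwise l).mpr this)
      · exact (loop_iff_pairwise l).mpr ((alt_iff_pairwise l).mp hb)
  · simp only [if_neg h1]
    symm
    rw [alt_iff_pairwise]
    cases l with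
    | nil => exact List.Pairwise.nil
    | cons a t =>
      cases t with
      | nil => exact List.pairwise_singleton _ _
      | cons b t => simp at h1
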